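-- pv_equiv track=rewrite | github.com/jphillips05/aoc_2025 | days/day2.py | invalid_ids
-- ===== SOURCE A (Python) =====
-- def has_repeated_pattern(id_str: str) -> bool:
--     """Check if an ID string contains a repeated pattern.
--
--     An ID is invalid if it can be broken into equal parts that are all the same.
--     For example, "123123123" is invalid because "123" is repeated 3 times.
--
--     Args:
--         id_str: The ID string to check
--
--     Returns:
--         True if the string contains a repeated pattern, False otherwise
--
--     Example:
--         >>> has_repeated_pattern("123123123")
--         True  # "123" repeated 3 times
--         >>> has_repeated_pattern("1234")
--         False  # no repeating pattern
--         >>> has_repeated_pattern("1111")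
--         True  # "1" repeated 4 times
--     """
--     length = len(id_str)
--
--     # Check all possible pattern lengths (excluding trivial cases)
--     for pattern_len in range(1, length // 2 + 1):
--         if length % pattern_len != 0:
--             continue
--
--         pattern = id_str[:pattern_len]
--         num_repeats = length // pattern_len
--
--         # Check if the pattern repeats throughout the string
--         if pattern * num_repeats == id_str:
--             return True
--
--     return False
--
-- def is_valid_id(id_num: int) -> bool:
--     """Check if an ID is valid by comparing both halves of its string representation.
--
--     An ID is invalid if both halves are the same. An ID is valid if the halves differ
--     or if it has an odd length.
--
--     Args:
--         id_num: The ID number to validate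
--
--     Returns:
--         True if the ID is valid (halves differ or odd length),
--         False if invalid (halves are the same)
--
--     Example:
--         >>> is_valid_id(1212)
--         False  # "12" == "12", invalid
--         >>> is_valid_id(1234)
--         True  # "12" != "34", valid
--         >>> is_valid_id(123)
--         True  # odd length, valid
--     """
--     id_str = str(id_num)
--     length = len(id_str)
--
--     # Can't split odd-length strings evenly, so they're valid
--     if length % 2 != 0:
--         return True
--
--     mid = length // 2
--     first_half = id_str[:mid]
--     second_half = id_str[mid:]
--
--     # If halves are the same, ID is invalid
--     return first_half != second_half
--
-- def invalid_ids(numbers: list[int], check_repeating: bool = False) -> list[int]: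
--     all_invalid_ids = []
--
--     for num in numbers:
--         id_str = str(num)
--         is_invalid = False
--
--         # Check validity condition
--         if check_repeating:
--             # Invalid if it has a repeated pattern
--             is_invalid = has_repeated_pattern(id_str)
--         else:
--             # Invalid if halves are the same
--             is_invalid = not is_valid_id(id_str)
--
--         if is_invalid:
--             all_invalid_ids.append(num)
--     return all_invalid_ids
-- ===== SOURCE B (Python) =====
-- def invalid_ids(numbers: list[int], check_repeating: bool = False) -> list[int]:
--     def is_invalid(s: str) -> bool:
--         if check_repeating:
--             # s is a proper power of a shorter block iff it occurs inside (s+s)[1:-1]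
--             return s in (s + s)[1:-1]
--         half = len(s) // 2
--         return len(s) % 2 == 0 and s[:half] == s[half:]
--
--     return [num for num in numbers if is_invalid(str(num))]
-- ===== Notes on version B (the rewrite author's own statement) =====
-- stated objective: idiomatic
-- what changed: Replaces the divisor-enumeration loop for repeated patterns with the classic string-periodicity idiom s in (s+s)[1:-1] (one substring search), fuses is_valid_id into a single halves-equal boolean, and builds the result with a list comprehension instead of an append loop.
import Mathlib
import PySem

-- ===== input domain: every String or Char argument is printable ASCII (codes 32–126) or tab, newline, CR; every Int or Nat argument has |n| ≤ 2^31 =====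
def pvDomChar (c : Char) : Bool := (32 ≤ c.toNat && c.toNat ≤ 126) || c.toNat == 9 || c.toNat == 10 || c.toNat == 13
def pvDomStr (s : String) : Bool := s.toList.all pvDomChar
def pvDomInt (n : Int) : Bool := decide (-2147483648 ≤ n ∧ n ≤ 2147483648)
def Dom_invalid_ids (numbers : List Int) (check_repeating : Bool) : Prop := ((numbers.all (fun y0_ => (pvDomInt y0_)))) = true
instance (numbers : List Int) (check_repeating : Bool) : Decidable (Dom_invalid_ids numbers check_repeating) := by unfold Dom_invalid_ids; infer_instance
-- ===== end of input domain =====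

-- B replaces A's divisor-enumeration pattern check by the string-periodicity substring idiom
-- (s in (s+s)[1:-1]) and the append loop by a filter (idiomatic; same return value).

-- ===== PORT A =====
-- strings are ported as their code-point lists (PySem.Chars / PySem.List primitives)
def has_repeated_pattern (id_str : List Char) : Bool :=
  let length : Int := PySem.Chars.len id_str
  (PySem.List.pyRange 1 (PySem.Int.floordiv length 2 + 1) 1).any fun pattern_len =>
    if PySem.Int.mod length pattern_len != 0 then false   -- 'continue'
    else
      let pattern := PySem.List.slice id_str none (some pattern_len)
      let num_repeats := PySem.Int.floordiv length pattern_len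
      PySem.List.pyRepeat pattern num_repeats == id_str   -- early 'return True' ≙ List.any

-- A always calls is_valid_id with a str, on which its str(id_num) is the identity
def is_valid_id (id_str : List Char) : Bool :=
  let length : Int := PySem.Chars.len id_str
  if PySem.Int.mod length 2 != 0 then true
  else
    let mid := PySem.Int.floordiv length 2
    let first_half := PySem.List.slice id_str none (some mid)
    let second_half := PySem.List.slice id_str (some mid) none
    first_half != second_half

def invalid_ids (numbers : List Int) (check_repeating : Bool) : List Int :=
  numbers.foldl (fun all_invalid_ids num =>
    let id_str := PySem.Int.toChars num
    let is_invalid := if check_repeating then has_repeated_pattern id_str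
                      else !(is_valid_id id_str)
    if is_invalid then all_invalid_ids ++ [num] else all_invalid_ids) []

-- ===== PORT B =====
def pvIsInvalid (check_repeating : Bool) (s : List Char) : Bool :=
  if check_repeating then
    PySem.Chars.isIn s (PySem.List.slice (s ++ s) (some 1) (some (-1)))
  else
    let half := s.length / 2
    decide (s.length % 2 = 0) && (s.take half == s.drop half)

def invalid_ids_alt (numbers : List Int) (check_repeating : Bool) : List Int :=
  numbers.filter (fun num => pvIsInvalid check_repeating (PySem.Int.toChars num))

-- ===== PRECONDITION & SPEC =====
def Spec_invalid_ids (numbers : List Int) (check_repeating : Bool) (out : List Int) : Prop := out = invalid_ids_alt numbers check_repeating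
instance (numbers : List Int) (check_repeating : Bool) (out : List Int) : Decidable (Spec_invalid_ids numbers check_repeating out) := by unfold Spec_invalid_ids; infer_instance

-- ===== CLAIM (what is proved, stated in full; the proofs are below) =====
def Claim_equal_invalid_ids : Prop := ∀ (numbers : List Int) (check_repeating : Bool), Dom_invalid_ids numbers check_repeating → Spec_invalid_ids numbers check_repeating (invalid_ids numbers check_repeating)

-- ===== LEMMAS AND PROOFS =====

lemma pvToDigitsCore_len (b : ℕ) : ∀ (f n : ℕ) (ds : List Char),
    ds.length ≤ (Nat.toDigitsCore b f n ds).length := by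
  intro f
  induction f with
  | zero => intro n ds; simp [Nat.toDigitsCore]
  | succ f ih =>
    intro n ds
    simp only [Nat.toDigitsCore]
    split
    · simp
    · exact le_trans (by simp) (ih (n / b) _)

lemma pvToChars_ne_nil (n : Int) : PySem.Int.toChars n ≠ [] := by
  have h : ∀ m : ℕ, Nat.toDigits 10 m ≠ [] := by
    intro m
    unfold Nat.toDigits
    intro hcon
    have := pvToDigitsCore_len 10 m (m / 10) [Nat.digitChar (m % 10)]
    simp only [Nat.toDigitsCore] at hcon
    split at hcon
    · simp at hcon
    · rw [hcon] at this; simp at this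
  unfold PySem.Int.toChars
  split <;> simp [h]

lemma pvFlatten_replicate_comm {α : Type} (m : ℕ) (p : List α) :
    p ++ (List.replicate m p).flatten = (List.replicate m p).flatten ++ p := by
  induction m with
  | zero => simp
  | succ m ih => rw [List.replicate_succ, List.flatten_cons, List.append_assoc, ← ih, ← List.append_assoc]

lemma pvFlatten_replicate_snoc {α : Type} (m : ℕ) (p : List α) :
    (List.replicate (m + 1) p).flatten = (List.replicate m p).flatten ++ p := by
  induction m with
  | zero => simp
  | succ m ih => rw [List.replicate_succ, List.flatten_cons, ih, ← List.append_assoc, pvFlatten_replicate_comm]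

lemma pvRotate_of_pow {α : Type} (p : List α) (m d : ℕ) (hm : 1 ≤ m) (hd : p.length = d)
    (l : List α) (hl : l = (List.replicate m p).flatten) : l.rotate d = l := by
  obtain ⟨m', rfl⟩ : ∃ m', m = m' + 1 := ⟨m - 1, by omega⟩
  have hlen : l.length = (m' + 1) * d := by
    simp [hl, List.length_flatten, hd, List.map_replicate, Nat.mul_comm]
  have hdle : d ≤ l.length := by
    have : d ≤ (m' + 1) * d := Nat.le_mul_of_pos_left d (by omega)
    omega
  rw [List.rotate_eq_drop_append_take hdle]
  have hdrop : l.drop d = (List.replicate m' p).flatten := by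
    rw [hl, List.replicate_succ, List.flatten_cons, ← hd, List.drop_left]
  have htake : l.take d = p := by
    rw [hl, List.replicate_succ, List.flatten_cons, ← hd, List.take_left]
  rw [hdrop, htake, ← pvFlatten_replicate_snoc, ← hl]

lemma pvDivArith (a b : ℕ) (hp : 0 < a) (hdvd : a ∣ b) (hpos : 0 < b) :
    (b - a) / a + 1 = b / a := by
  obtain ⟨c, hc⟩ := hdvd
  have hc0 : c ≠ 0 := by rintro rfl; simp [hc] at hpos
  have h1 : a * c - a = a * (c - 1) := by
    rw [Nat.mul_sub, Nat.mul_one]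
  rw [hc, h1, Nat.mul_div_cancel_left _ hp, Nat.mul_div_cancel_left _ hp]
  omega

lemma pvComm_pow {α : Type} (p : List α) (hp : 0 < p.length) :
    ∀ t : List α, p ++ t = t ++ p → p.length ∣ t.length →
      t = (List.replicate (t.length / p.length) p).flatten := by
  intro t
  induction ht : t.length using Nat.strong_induction_on generalizing t with
  | _ n ih =>
    intro hcomm hdvd
    subst ht
    rcases Nat.eq_zero_or_pos t.length with h0 | hpos
    · rw [List.eq_nil_of_length_eq_zero h0]; simp
    · have hge : p.length ≤ t.length := Nat.le_of_dvd hpos hdvd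
      have htake : t.take p.length = p := by
        have h1 : (p ++ t).take p.length = p := by simp
        have h2 : (t ++ p).take p.length = t.take p.length := List.take_append_of_le_length hge
        rw [hcomm] at h1; rw [h2] at h1; exact h1
      have hteq : t = p ++ t.drop p.length := by
        conv_lhs => rw [← List.take_append_drop p.length t, htake]
      have hcomm' : p ++ t.drop p.length = t.drop p.length ++ p := by
        have h2 : p ++ (p ++ t.drop p.length) = (p ++ t.drop p.length) ++ p := by
          rw [← hteq]; exact hcomm
        rw [List.append_assoc] at h2
        exact List.append_cancel_left h2
      have hdvd' : p.length ∣ (t.drop p.length).length := by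
        simp only [List.length_drop]
        exact Nat.dvd_sub hdvd dvd_rfl
      have hlt : (t.drop p.length).length < t.length := by
        simp only [List.length_drop]; omega
      have hrec := ih _ hlt _ rfl hcomm' hdvd'
      conv_lhs => rw [hteq, hrec]
      simp only [List.length_drop]
      rw [← pvDivArith p.length t.length hp hdvd hpos, List.replicate_succ, List.flatten_cons]

lemma pvPow_of_rotate {α : Type} (l : List α) (d : ℕ) (hd : 0 < d) (hdvd : d ∣ l.length)
    (h : l.rotate d = l) : l = (List.replicate (l.length / d) (l.take d)).flatten := by
  rcases Nat.eq_zero_or_pos l.length with h0 | hpos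
  · rw [List.eq_nil_of_length_eq_zero h0]; simp
  · have hdle : d ≤ l.length := Nat.le_of_dvd hpos hdvd
    have hplen : (l.take d).length = d := by simp [hdle]
    have hcomm : l.take d ++ l.drop d = l.drop d ++ l.take d := by
      rw [List.take_append_drop]
      rw [← List.rotate_eq_drop_append_take hdle, h]
    have hdvd' : (l.take d).length ∣ (l.drop d).length := by
      simp only [hplen, List.length_drop]
      exact Nat.dvd_sub hdvd dvd_rfl
    have hrec := pvComm_pow (l.take d) (by omega) (l.drop d) hcomm hdvd'
    conv_lhs => rw [← List.take_append_drop d l, hrec]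
    simp only [List.length_drop, hplen]
    rw [← pvDivArith d l.length hd hdvd hpos, List.replicate_succ, List.flatten_cons]

lemma pvRotate_gcd {α : Type} (l : List α) : ∀ a b : ℕ, 0 < a →
    l.rotate a = l → l.rotate b = l → l.rotate (Nat.gcd a b) = l := by
  intro a
  induction a using Nat.strong_induction_on with
  | _ a ih =>
    intro b ha hra hrb
    rcases Nat.eq_zero_or_pos (b % a) with h0 | hpos
    · rw [Nat.gcd_rec, h0, Nat.gcd_zero_left]; exact hra
    · have hmul : l.rotate (a * (b / a)) = l := by
        induction (b / a) with
        | zero => simp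
        | succ m ihm => rw [Nat.mul_succ, ← List.rotate_rotate, ihm, hra]
      have hmod : l.rotate (b % a) = l := by
        have hx : l.rotate (a * (b / a) + b % a) = l := by
          rw [Nat.div_add_mod]; exact hrb
        rw [← List.rotate_rotate, hmul] at hx
        exact hx
      rw [Nat.gcd_rec]
      exact ih (b % a) (Nat.mod_lt b ha) a hpos hmod hra

lemma pvPrefix_drop_iff_rotate {α : Type} (l : List α) (k : ℕ) (hk : k ≤ l.length) :
    l <+: (l ++ l).drop k ↔ l.rotate k = l := by
  have hdrop : (l ++ l).drop k = l.drop k ++ l := List.drop_append_of_le_length hk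
  rw [hdrop]
  constructor
  · intro hpre
    have htake := List.prefix_iff_eq_take.mp hpre
    have hx : (l.drop k ++ l).take l.length = l.drop k ++ l.take k := by
      rw [List.take_append]
      congr 1
      · exact List.take_of_length_le (by simp)
      · congr 1; simp; omega
    rw [hx] at htake
    rw [List.rotate_eq_drop_append_take hk]
    exact htake.symm
  · intro hrot
    rw [List.rotate_eq_drop_append_take hk] at hrot
    conv_lhs => rw [← hrot]
    exact (List.prefix_append_right_inj _).mpr (List.take_prefix k l)

lemma pvSlice_mid {α : Type} (l : List α) (h : l ≠ []) :
    PySem.List.slice (l ++ l) (some 1) (some (-1)) =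
      ((l ++ l).drop 1).take (2 * l.length - 2) := by
  have h1 : 0 < l.length := List.length_pos_iff.mpr h
  simp [PySem.List.slice, List.length_append]
  have hmin : min 1 (l.length + l.length) = 1 := by omega
  rw [hmin, List.drop_one]
  congr 1
  omega
lemma pvHasRep_iff (l : List Char) :
    has_repeated_pattern l = true ↔
      ∃ d : ℕ, 1 ≤ d ∧ d ≤ l.length / 2 ∧ l.length % d = 0 ∧
        (List.replicate (l.length / d) (l.take d)).flatten = l := by
  have h2 : PySem.Int.floordiv ((l.length : Int)) 2 = ((l.length / 2 : ℕ) : Int) := by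
    exact_mod_cast PySem.Int.floordiv_natCast l.length 2
  simp only [has_repeated_pattern, List.any_eq_true, PySem.Chars.len_eq]
  constructor
  · rintro ⟨x, hx, hp⟩
    rw [PySem.List.mem_pyRange_iff_of_pos (by norm_num)] at hx
    obtain ⟨hx1, hx2, -⟩ := hx
    obtain ⟨d, rfl⟩ : ∃ d : ℕ, x = (d : Int) := ⟨x.toNat, by omega⟩
    refine ⟨d, by exact_mod_cast hx1, ?_, ?_, ?_⟩
    · rw [h2] at hx2; omega
    · rw [PySem.Int.mod_natCast] at hp
      split at hp
      · simp at hp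
      · next hmod =>
        simp only [bne_iff_ne, ne_eq, not_not] at hmod
        exact_mod_cast hmod
    · rw [PySem.Int.mod_natCast] at hp
      split at hp
      · simp at hp
      · simp only [beq_iff_eq] at hp
        rw [PySem.List.pyRepeat, PySem.Int.floordiv_natCast,
            PySem.List.slice_to l (Int.natCast_nonneg d)] at hp
        simpa using hp
  · rintro ⟨d, hd1, hd2, hmod, hflat⟩
    refine ⟨(d : Int), ?_, ?_⟩
    · rw [PySem.List.mem_pyRange_iff_of_pos (by norm_num), h2]
      refine ⟨by exact_mod_cast hd1, by omega, one_dvd _⟩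
    · rw [PySem.Int.mod_natCast]
      have hmz : ((l.length % d : ℕ) : Int) = 0 := by exact_mod_cast hmod
      rw [hmz]
      simp only [bne_self_eq_false, Bool.false_eq_true, if_false]
      rw [PySem.List.pyRepeat, PySem.Int.floordiv_natCast,
          PySem.List.slice_to l (Int.natCast_nonneg d)]
      simpa using hflat

lemma pvKey (l : List Char) (hne : l ≠ []) :
    ((∃ d : ℕ, 1 ≤ d ∧ d ≤ l.length / 2 ∧ l.length % d = 0 ∧
        (List.replicate (l.length / d) (l.take d)).flatten = l) ↔
      PySem.Chars.isIn l (PySem.List.slice (l ++ l) (some 1) (some (-1))) = true) := by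
  have hpos : 0 < l.length := List.length_pos_iff.mpr hne
  rw [← PySem.Chars.exists_prefix_drop_iff_isIn, pvSlice_mid l hne]
  constructor
  · rintro ⟨d, hd1, hd2, hmod, hflat⟩
    have hdvd : d ∣ l.length := Nat.dvd_of_mod_eq_zero hmod
    have h2d : 2 * d ≤ l.length := by
      have := (Nat.le_div_iff_mul_le (by norm_num)).mp hd2
      omega
    have hm2 : 1 ≤ l.length / d := by
      rw [Nat.le_div_iff_mul_le (by omega)]; omega
    have htl : (l.take d).length = d := by simp; omega
    have hrot : l.rotate d = l := pvRotate_of_pow (l.take d) (l.length / d) d hm2 htl l hflat.symm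
    have hpre : l <+: (l ++ l).drop d := (pvPrefix_drop_iff_rotate l d (by omega)).mpr hrot
    refine ⟨d - 1, ?_⟩
    rw [List.drop_take, List.drop_drop]
    rw [show 1 + (d - 1) = d by omega]
    exact List.prefix_take_iff.mpr ⟨hpre, by omega⟩
  · rintro ⟨j, hj⟩
    rw [List.drop_take, List.drop_drop] at hj
    obtain ⟨hp, hlen⟩ := List.prefix_take_iff.mp hj
    have hkn : 1 + j ≤ l.length := by omega
    have hrot := (pvPrefix_drop_iff_rotate l (1 + j) hkn).mp hp
    have hg := pvRotate_gcd l (1 + j) l.length (by omega) hrot (List.rotate_length l)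
    have hgpos : 0 < Nat.gcd (1 + j) l.length := Nat.gcd_pos_of_pos_left l.length (by omega)
    have hgdvd : Nat.gcd (1 + j) l.length ∣ l.length := Nat.gcd_dvd_right _ _
    have hgk : Nat.gcd (1 + j) l.length ≤ 1 + j := Nat.gcd_le_left _ (by omega)
    have h2 : 2 * Nat.gcd (1 + j) l.length ≤ l.length := by
      obtain ⟨c, hc⟩ := hgdvd
      have hc2 : 2 ≤ c := by by_contra hcon; interval_cases c <;> omega
      calc 2 * Nat.gcd (1 + j) l.length = Nat.gcd (1 + j) l.length * 2 := by ring
        _ ≤ Nat.gcd (1 + j) l.length * c := Nat.mul_le_mul_left _ hc2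
        _ = l.length := hc.symm
    refine ⟨Nat.gcd (1 + j) l.length, hgpos, ?_, ?_, (pvPow_of_rotate l _ hgpos hgdvd hg).symm⟩
    · rw [Nat.le_div_iff_mul_le (by norm_num)]; omega
    · exact Nat.dvd_iff_mod_eq_zero.mp hgdvd

lemma pvPointwise_true (s : List Char) (h : s ≠ []) :
    has_repeated_pattern s = pvIsInvalid true s := by
  have hiff := (pvHasRep_iff s).trans (pvKey s h)
  simp only [pvIsInvalid, if_true]
  exact Bool.eq_iff_iff.mpr hiff

lemma pvPointwise_false (s : List Char) :
    (!is_valid_id s) = pvIsInvalid false s := by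
  simp only [is_valid_id, pvIsInvalid, PySem.Chars.len_eq, if_neg (Bool.false_ne_true)]
  have hm : PySem.Int.mod ((s.length : Int)) 2 = ((s.length % 2 : ℕ) : Int) := by
    exact_mod_cast PySem.Int.mod_natCast s.length 2
  have h2 : PySem.Int.floordiv ((s.length : Int)) 2 = ((s.length / 2 : ℕ) : Int) := by
    exact_mod_cast PySem.Int.floordiv_natCast s.length 2
  rw [hm, h2]
  by_cases he : s.length % 2 = 0
  · rw [he]
    rw [PySem.List.slice_to s (Int.natCast_nonneg _), PySem.List.slice_from s (Int.natCast_nonneg _)]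
    simp only [bne, Int.toNat_natCast]
    simp
  · rw [if_pos (show ((((s.length % 2 : ℕ) : Int)) != 0) = true from by
      simpa using (by exact_mod_cast he : ((s.length % 2 : ℕ) : Int) ≠ 0))]
    simp [he]

lemma pvFoldl_eq_filter (numbers : List Int) (cr : Bool) :
    invalid_ids numbers cr = invalid_ids_alt numbers cr := by
  have hpt : ∀ num : Int,
      (if cr then has_repeated_pattern (PySem.Int.toChars num)
       else !(is_valid_id (PySem.Int.toChars num))) = pvIsInvalid cr (PySem.Int.toChars num) := by
    intro num
    cases cr
    · exact pvPointwise_false _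
    · exact pvPointwise_true _ (pvToChars_ne_nil num)
  unfold invalid_ids invalid_ids_alt
  rw [PySem.List.foldl_append_if
    (fun num => if cr then has_repeated_pattern (PySem.Int.toChars num)
                else !(is_valid_id (PySem.Int.toChars num))) (fun num => num) numbers []]
  rw [List.filter_congr (fun x _ => hpt x)]
  simp

-- ===== VERDICT (by name: the statement is the Claim_ definition above) =====
theorem invalid_ids_spec : Claim_equal_invalid_ids := by
  intro numbers check_repeating _hdom
  unfold Spec_invalid_ids
  exact pvFoldl_eq_filter numbers check_repeating
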